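-- pv_equiv track=rewrite | github.com/lawseekdog/e2e-tests | scripts/_support/run_status.py | _latest_trace_progress
-- ===== SOURCE A (Python) =====
-- from typing import Any
--
-- def safe_str(value: Any) -> str:
--     return str(value or "").strip()
--
-- def _trace_phase_token(row: dict[str, Any]) -> str:
--     phase = safe_str(row.get("phase"))
--     if phase:
--         return phase
--     node_id = safe_str(row.get("node_id"))
--     if ":" in node_id:
--         return safe_str(node_id.rsplit(":", 1)[-1])
--     return ""
--
-- def _latest_trace_progress(execution_traces: list[dict[str, Any]] | None) -> dict[str, str]:
--     rows = [row for row in (execution_traces or []) if isinstance(row, dict)]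
--     if not rows:
--         return {
--             "current_task_id": "",
--             "current_node": "",
--             "phase_id": "",
--             "current_subgraph": "",
--             "last_completed_phase": "",
--         }
--     current_row = rows[-1]
--     for row in reversed(rows):
--         if safe_str(row.get("status")).lower() not in {"completed", "failed", "blocked", "aborted"}:
--             current_row = row
--             break
--
--     last_completed_phase = ""
--     for row in rows:
--         if safe_str(row.get("status")).lower() != "completed":
--             continue
--         phase = _trace_phase_token(row)
--         if phase:
--             last_completed_phase = phase
--
--     phase_id = _trace_phase_token(current_row)
--     current_node = safe_str(current_row.get("node_name") or current_row.get("node_id"))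
--     return {
--         "current_task_id": safe_str(current_row.get("node_id")),
--         "current_node": current_node,
--         "phase_id": phase_id,
--         "current_subgraph": phase_id,
--         "last_completed_phase": last_completed_phase,
--     }
-- ===== SOURCE B (Python) =====
-- from typing import Any
--
-- _TERMINAL = {"completed", "failed", "blocked", "aborted"}
--
-- def _norm(value: Any) -> str:
--     return str(value or "").strip()
--
-- def _phase_of(row: dict[str, Any]) -> str:
--     phase = _norm(row.get("phase"))
--     if phase:
--         return phase
--     node_id = _norm(row.get("node_id"))
--     if ":" in node_id:
--         return _norm(node_id.rsplit(":", 1)[-1])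
--     return ""
--
-- def _latest_trace_progress(execution_traces: "list[dict[str, Any]] | None") -> dict[str, str]:
--     rows = [row for row in (execution_traces or []) if isinstance(row, dict)]
--     current_row = None
--     last_completed_phase = None
--     # single backward pass: first non-terminal row from the end is the current
--     # row; first completed row (from the end) with a phase token gives the
--     # last completed phase
--     for row in reversed(rows):
--         status = _norm(row.get("status")).lower()
--         if current_row is None and status not in _TERMINAL:
--             current_row = row
--         if last_completed_phase is None and status == "completed":
--             phase = _phase_of(row)
--             if phase:
--                 last_completed_phase = phase
--     if last_completed_phase is None:
--         last_completed_phase = ""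
--     if current_row is None:
--         if not rows:
--             return {
--                 "current_task_id": "",
--                 "current_node": "",
--                 "phase_id": "",
--                 "current_subgraph": "",
--                 "last_completed_phase": "",
--             }
--         current_row = rows[-1]
--     phase_id = _phase_of(current_row)
--     return {
--         "current_task_id": _norm(current_row.get("node_id")),
--         "current_node": _norm(current_row.get("node_name") or current_row.get("node_id")),
--         "phase_id": phase_id,
--         "current_subgraph": phase_id,
--         "last_completed_phase": last_completed_phase,
--     }
-- ===== Notes on version B (the rewrite author's own statement) =====
-- stated objective: alternative
-- what changed: A finds the current row with a backward break-scan and the last completed phase with a separate forward accumulating fold; B is a single backward first-match pass that resolves both in one traversal (the last completed phase becomes the first completed row with a phase token seen from the end).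
import Mathlib
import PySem

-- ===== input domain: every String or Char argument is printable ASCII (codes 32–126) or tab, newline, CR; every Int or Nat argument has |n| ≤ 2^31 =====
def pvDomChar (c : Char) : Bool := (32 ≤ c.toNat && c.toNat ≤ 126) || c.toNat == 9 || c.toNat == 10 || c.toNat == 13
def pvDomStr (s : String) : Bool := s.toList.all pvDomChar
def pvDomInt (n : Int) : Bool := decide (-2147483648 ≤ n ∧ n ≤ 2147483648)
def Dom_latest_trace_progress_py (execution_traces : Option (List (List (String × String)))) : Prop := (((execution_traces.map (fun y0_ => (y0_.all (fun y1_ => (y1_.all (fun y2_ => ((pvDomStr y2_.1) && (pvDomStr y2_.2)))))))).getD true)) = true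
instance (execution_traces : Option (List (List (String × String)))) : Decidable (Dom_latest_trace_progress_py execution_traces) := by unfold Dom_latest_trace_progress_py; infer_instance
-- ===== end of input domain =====

-- B replaces A's two separate scans (a backward break-scan for the current row and a
-- forward fold for the last completed phase) by one backward first-match pass; objective: alternative (same cost).


-- ===== PORT A =====
-- shared helpers: both Pythons define safe_str / the phase-token helper identically
-- safe_str(row.get(k)) : row.get gives Option String; `value or ""` is getD ""; str of a str is itself
def pvSafeGet (row : List (String × String)) (k : String) : String :=
  PySem.Str.strip ((PySem.Dict.get? (PySem.Dict.mk row) k).getD "")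

-- _trace_phase_token; node_id.rsplit(":", 1)[-1] = the part after the LAST ':', i.e. the
-- last piece of split(":") (exact here since ":" occurs in node_id and sep ≠ "")
def pvPhaseToken (row : List (String × String)) : String :=
  let phase := pvSafeGet row "phase"
  if phase ≠ "" then phase
  else
    let node_id := pvSafeGet row "node_id"
    if PySem.Str.isIn ":" node_id then
      PySem.Str.strip (((PySem.Str.split? node_id ":").getD []).getLastD "")
    else ""

def pvStatusLower (row : List (String × String)) : String :=
  PySem.Str.lower (pvSafeGet row "status")

def pvIsTerminal (row : List (String × String)) : Bool :=
  ["completed", "failed", "blocked", "aborted"].contains (pvStatusLower row)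

-- current_node = safe_str(row.get("node_name") or row.get("node_id"))
def pvCurrentNode (row : List (String × String)) : String :=
  let nn := PySem.Dict.get? (PySem.Dict.mk row) "node_name"
  let v : Option String :=
    match nn with
    | some s => if s ≠ "" then some s else PySem.Dict.get? (PySem.Dict.mk row) "node_id"
    | none => PySem.Dict.get? (PySem.Dict.mk row) "node_id"
  PySem.Str.strip (v.getD "")

def pvEmptyResult : List (String × String) :=
  [("current_task_id", ""), ("current_node", ""), ("phase_id", ""),
   ("current_subgraph", ""), ("last_completed_phase", "")]

-- the returned dict, identical in both Pythons
def pvAssemble (current_row : List (String × String)) (lcp : String) : List (String × String) :=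
  let phase_id := pvPhaseToken current_row
  [("current_task_id", pvSafeGet current_row "node_id"),
   ("current_node", pvCurrentNode current_row),
   ("phase_id", phase_id),
   ("current_subgraph", phase_id),
   ("last_completed_phase", lcp)]

-- port of A: backward break-scan (find? on the reversed list) for current_row,
-- then a forward fold for last_completed_phase
def latest_trace_progress_py (execution_traces : Option (List (List (String × String)))) : List (String × String) :=
  let rows := execution_traces.getD []
  match rows.getLast? with
  | none => pvEmptyResult
  | some lastRow =>
    let current_row := (rows.reverse.find? (fun r => !pvIsTerminal r)).getD lastRow
    let lcp := rows.foldl (fun acc r =>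
        if pvStatusLower r ≠ "completed" then acc
        else
          let p := pvPhaseToken r
          if p ≠ "" then p else acc) ""
    pvAssemble current_row lcp

-- ===== PORT B =====
-- one backward pass over rows (Source B's `for row in reversed(rows)`), first-match updates
def pvBScan : List (List (String × String)) → Option (List (String × String)) → Option String →
    (Option (List (String × String)) × Option String)
  | [], c, l => (c, l)
  | r :: rs, c, l =>
    let st := pvStatusLower r
    let c' := if c.isNone && !(["completed", "failed", "blocked", "aborted"].contains st) then some r else c
    let l' := if l.isNone && st == "completed" then
        (let p := pvPhaseToken r
         if p ≠ "" then some p else l)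
      else l
    pvBScan rs c' l'

def latest_trace_progress_py_alt (execution_traces : Option (List (List (String × String)))) : List (String × String) :=
  let rows := execution_traces.getD []
  let cl := pvBScan rows.reverse none none
  let lcp := cl.2.getD ""
  match cl.1 with
  | some cr => pvAssemble cr lcp
  | none =>
    match rows.getLast? with
    | none => pvEmptyResult
    | some lastRow => pvAssemble lastRow lcp

-- ===== PRECONDITION & SPEC =====
def Spec_latest_trace_progress_py (execution_traces : Option (List (List (String × String)))) (out : List (String × String)) : Prop := out = latest_trace_progress_py_alt execution_traces
instance (execution_traces : Option (List (List (String × String)))) (out : List (String × String)) : Decidable (Spec_latest_trace_progress_py execution_traces out) := by unfold Spec_latest_trace_progress_py; infer_instance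

-- ===== CLAIM (what is proved, stated in full; the proofs are below) =====
def Claim_equal_latest_trace_progress_py : Prop := ∀ (execution_traces : Option (List (List (String × String)))), Dom_latest_trace_progress_py execution_traces → Spec_latest_trace_progress_py execution_traces (latest_trace_progress_py execution_traces)

-- ===== LEMMAS AND PROOFS =====

-- the completed-phase extractor both characterisations reduce to
def pvG (r : List (String × String)) : Option String :=
  if pvStatusLower r = "completed" ∧ pvPhaseToken r ≠ "" then some (pvPhaseToken r) else none

theorem pvBScan_fst (l : List (List (String × String)))
    (c : Option (List (String × String))) (lacc : Option String) :
    (pvBScan l c lacc).1 = c.or (l.find? (fun r => !pvIsTerminal r)) := by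
  have key : ∀ r : List (String × String),
      (["completed", "failed", "blocked", "aborted"].contains (pvStatusLower r)) = pvIsTerminal r :=
    fun _ => rfl
  induction l generalizing c lacc with
  | nil => simp [pvBScan]
  | cons r rs ih =>
    cases hT : pvIsTerminal r with
    | true =>
      have hf : List.find? (fun r => !pvIsTerminal r) (r :: rs) = List.find? (fun r => !pvIsTerminal r) rs := by
        rw [List.find?_cons_of_neg]; simp [hT]
      rw [hf]
      cases c <;> simp only [pvBScan, key, hT] <;> simp [ih]
    | false =>
      have hf : List.find? (fun r => !pvIsTerminal r) (r :: rs) = some r := by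
        rw [List.find?_cons_of_pos]; simp [hT]
      rw [hf]
      cases c <;> simp only [pvBScan, key, hT] <;> simp [ih]

theorem pvBScan_snd (l : List (List (String × String)))
    (c : Option (List (String × String))) (lacc : Option String) :
    (pvBScan l c lacc).2 = lacc.or (l.findSome? pvG) := by
  induction l generalizing c lacc with
  | nil => simp [pvBScan]
  | cons r rs ih =>
    cases lacc with
    | some x => simp [pvBScan, ih]
    | none =>
      by_cases hc : pvStatusLower r = "completed"
      · by_cases hp : pvPhaseToken r = ""
        · simp [pvBScan, pvG, hc, hp, ih]
        · simp [pvBScan, pvG, hc, hp, ih]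
      · simp [pvBScan, pvG, hc, ih]

theorem foldl_lcp (rows : List (List (String × String))) (d : String) :
    rows.foldl (fun acc r =>
        if pvStatusLower r ≠ "completed" then acc
        else
          let p := pvPhaseToken r
          if p ≠ "" then p else acc) d
      = (rows.reverse.findSome? pvG).getD d := by
  induction rows generalizing d with
  | nil => simp
  | cons r rs ih =>
    simp only [List.foldl_cons, List.reverse_cons, List.findSome?_append, ih]
    have hstep : (if pvStatusLower r ≠ "completed" then d
        else
          let p := pvPhaseToken r
          if p ≠ "" then p else d) = (pvG r).getD d := by
      by_cases hc : pvStatusLower r = "completed"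
      · by_cases hp : pvPhaseToken r = "" <;> simp [pvG, hc, hp]
      · simp [pvG, hc]
    rw [hstep]
    cases hfs : rs.reverse.findSome? pvG <;> cases hg : pvG r <;>
      simp [Option.or, List.findSome?, hg]

-- ===== VERDICT (by name: the statement is the Claim_ definition above) =====
theorem latest_trace_progress_py_spec : Claim_equal_latest_trace_progress_py := by
  intro et _
  unfold Spec_latest_trace_progress_py latest_trace_progress_py latest_trace_progress_py_alt
  cases hl : (et.getD []).getLast? with
  | none =>
    have : et.getD [] = [] := by
      cases h : et.getD [] with
      | nil => rfl
      | cons a b => simp [h] at hl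
    simp [this, pvBScan]
  | some lastRow =>
    simp only [pvBScan_fst, pvBScan_snd, Option.or, hl, foldl_lcp]
    cases hfind : (et.getD []).reverse.find? (fun r => !pvIsTerminal r) <;> simp
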